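-- pv_equiv track=rewrite | github.com/1Goblin/codetree-TILs | 240419/2개 이상의 알파벳/more-than-one-alphabet.py | stcheck
-- ===== SOURCE A (Python) =====
-- def stcheck(st):
--     cnt = 0
--     for i in range(len(st)-1):
--         for j in range(i+1,len(st)):
--             if st[i]==st[j]:
--                 cnt+=1
--         if cnt>=2:
--             return True
--         cnt = 0
--     return False
-- ===== SOURCE B (Python) =====
-- def stcheck(st):
--     counts = {}
--     for ch in st:
--         c = counts.get(ch, 0) + 1
--         if c >= 3:
--             return True
--         counts[ch] = c
--     return False
-- ===== Notes on version B (the rewrite author's own statement) =====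
-- stated objective: faster
-- what changed: Replaces A's nested pairwise index scan with a single pass maintaining a hash-map counter per character, returning True as soon as any character's count reaches 3.
import Mathlib
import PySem

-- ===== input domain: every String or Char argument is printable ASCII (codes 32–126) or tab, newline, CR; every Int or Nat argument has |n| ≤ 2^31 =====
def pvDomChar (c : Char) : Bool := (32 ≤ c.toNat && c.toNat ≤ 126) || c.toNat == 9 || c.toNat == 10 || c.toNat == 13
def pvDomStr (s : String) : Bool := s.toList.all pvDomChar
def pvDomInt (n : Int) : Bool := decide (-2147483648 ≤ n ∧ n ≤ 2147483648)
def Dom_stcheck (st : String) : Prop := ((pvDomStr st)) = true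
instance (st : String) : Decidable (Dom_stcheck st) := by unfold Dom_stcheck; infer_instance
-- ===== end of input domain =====

-- B replaces A's quadratic nested index scan by one linear pass over the characters with a counter dict (objective: faster).

-- ===== PORT A =====
-- inner loop 'for j in range(i+1, len(st)): if st[i]==st[j]: cnt += 1' (cnt starts at 0 each outer round);
-- indices produced by range are always in range, so st[i]/st[j] is pyGetD (default never read)
def stcheckInner (l : List Char) (i : Int) : Int :=
  (PySem.List.pyRange (i + 1) l.length 1).foldl
    (fun cnt j => if PySem.List.pyGetD l i ' ' == PySem.List.pyGetD l j ' ' then cnt + 1 else cnt) 0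

-- outer loop 'for i in range(len(st)-1)' with the early 'return True' when cnt >= 2
def stcheckOuter (l : List Char) : List Int → Bool
  | [] => false
  | i :: rest => if stcheckInner l i ≥ 2 then true else stcheckOuter l rest

def stcheck (st : String) : Bool :=
  stcheckOuter st.toList (PySem.List.pyRange 0 ((st.toList.length : Int) - 1) 1)

-- ===== PORT B =====
-- 'for ch in st: c = counts.get(ch, 0) + 1; if c >= 3: return True; counts[ch] = c'
def stcheckAltGo (d : PySem.Dict Char Int) : List Char → Bool
  | [] => false
  | ch :: rest =>
      let c := d.getD ch 0 + 1
      if c ≥ 3 then true else stcheckAltGo (d.insert ch c) rest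

def stcheck_alt (st : String) : Bool := stcheckAltGo PySem.Dict.empty st.toList

-- ===== PRECONDITION & SPEC =====
def Spec_stcheck (st : String) (out : Bool) : Prop := out = stcheck_alt st
instance (st : String) (out : Bool) : Decidable (Spec_stcheck st out) := by unfold Spec_stcheck; infer_instance

-- ===== CLAIM (what is proved, stated in full; the proofs are below) =====
def Claim_equal_stcheck : Prop := ∀ (st : String), Dom_stcheck st → Spec_stcheck st (stcheck st)

-- ===== LEMMAS AND PROOFS =====

-- B's loop returns true iff some char of the remaining list, added to its running count, reaches 3
theorem altGo_iff (l : List Char) (d : PySem.Dict Char Int) :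
    stcheckAltGo d l = true ↔ ∃ c ∈ l, 3 ≤ d.getD c 0 + (l.count c : Int) := by
  induction l generalizing d with
  | nil => simp [stcheckAltGo]
  | cons ch rest ih =>
    simp only [stcheckAltGo]
    by_cases hc : d.getD ch 0 + 1 ≥ 3
    · rw [if_pos hc]
      simp only [true_iff]
      refine ⟨ch, List.mem_cons_self, ?_⟩
      rw [List.count_cons_self]
      push_cast
      omega
    · rw [if_neg hc, ih]
      constructor
      · rintro ⟨c', hm, hle⟩
        by_cases hq : c' = ch
        · subst hq
          rw [PySem.Dict.getD_insert_self] at hle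
          exact ⟨c', List.mem_cons_self, by rw [List.count_cons_self]; push_cast; omega⟩
        · rw [PySem.Dict.getD_insert_of_ne d _ 0 hq] at hle
          exact ⟨c', List.mem_cons_of_mem _ hm, by rw [List.count_cons_of_ne (Ne.symm hq)]; exact hle⟩
      · rintro ⟨c', hm, hle⟩
        by_cases hq : c' = ch
        · subst hq
          rw [List.count_cons_self] at hle
          push_cast at hle
          have hpos : 1 ≤ rest.count c' := by omega
          refine ⟨c', List.count_pos_iff.mp (by omega), ?_⟩
          rw [PySem.Dict.getD_insert_self]
          omega
        · rcases List.mem_cons.mp hm with h | h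
          · exact absurd h hq
          · refine ⟨c', h, ?_⟩
            rw [PySem.Dict.getD_insert_of_ne d _ 0 hq, ← List.count_cons_of_ne (Ne.symm hq)]
            exact hle

-- A's inner loop counts the occurrences of l[i] after position i
theorem inner_eq (l : List Char) (i : Int) (h0 : 0 ≤ i) (h1 : i < l.length) :
    stcheckInner l i = ((l.drop (i.toNat + 1)).count (l[i.toNat]'(by omega)) : Int) := by
  unfold stcheckInner
  rw [PySem.List.foldl_pyRange_pyGetD' l ' '
        (fun cnt x => if PySem.List.pyGetD l i ' ' == x then cnt + 1 else cnt) 0 (by omega)]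
  rw [PySem.List.pyGetD_eq_getElem l ' ' h0 h1]
  simp only [Bool.beq_comm]
  rw [PySem.List.foldl_beq_add_one]
  have : (i + 1).toNat = i.toNat + 1 := by omega
  rw [this]
  ring

theorem outer_iff (l : List Char) (idxs : List Int) :
    stcheckOuter l idxs = true ↔ ∃ i ∈ idxs, 2 ≤ stcheckInner l i := by
  induction idxs with
  | nil => simp [stcheckOuter]
  | cons i rest ih =>
    simp only [stcheckOuter]
    by_cases h : stcheckInner l i ≥ 2
    · rw [if_pos h]
      simp only [true_iff]
      exact ⟨i, List.mem_cons_self, h⟩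
    · rw [if_neg h, ih]
      constructor
      · rintro ⟨j, hj, hle⟩; exact ⟨j, List.mem_cons_of_mem _ hj, hle⟩
      · rintro ⟨j, hj, hle⟩
        rcases List.mem_cons.mp hj with rfl | hj
        · exact absurd hle h
        · exact ⟨j, hj, hle⟩

-- A returns true iff some character occurs at least three times
theorem aList_iff (l : List Char) :
    stcheckOuter l (PySem.List.pyRange 0 ((l.length : Int) - 1) 1) = true ↔
      ∃ c ∈ l, 3 ≤ l.count c := by
  rw [outer_iff]
  constructor
  · rintro ⟨i, hmem, hle⟩
    rw [PySem.List.mem_pyRange_one] at hmem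
    obtain ⟨h0, h1⟩ := hmem
    have hk : i.toNat < l.length := by omega
    rw [inner_eq l i h0 (by exact_mod_cast (by omega : i < (l.length : Int)))] at hle
    refine ⟨l[i.toNat], List.getElem_mem hk, ?_⟩
    have h2 : 2 ≤ (l.drop (i.toNat + 1)).count l[i.toNat] := by exact_mod_cast hle
    have hsplit : l.count l[i.toNat]
        = (l.take (i.toNat + 1)).count l[i.toNat] + (l.drop (i.toNat + 1)).count l[i.toNat] := by
      rw [← List.count_append, List.take_append_drop]
    have hmt : l[i.toNat] ∈ l.take (i.toNat + 1) := by
      have hlen : i.toNat < (l.take (i.toNat + 1)).length := by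
        simp [List.length_take]; omega
      have e : (l.take (i.toNat + 1))[i.toNat]'hlen = l[i.toNat] := List.getElem_take
      exact e ▸ List.getElem_mem hlen
    have hone : 0 < (l.take (i.toNat + 1)).count l[i.toNat] := List.count_pos_iff.mpr hmt
    omega
  · rintro ⟨c, hc, hcnt⟩
    have hk : l.idxOf c < l.length := List.idxOf_lt_length_of_mem hc
    have hget : l[l.idxOf c] = c := List.getElem_idxOf hk
    have hsplit : l.count c = (l.take (l.idxOf c)).count c + (l.drop (l.idxOf c)).count c := by
      rw [← List.count_append, List.take_append_drop]
    have hnot : c ∉ l.take (l.idxOf c) := fun hm =>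
      lt_irrefl _ ((List.mem_take_iff_idxOf_lt hc).mp hm)
    have htake : (l.take (l.idxOf c)).count c = 0 := List.count_eq_zero.mpr hnot
    have hdrop : l.drop (l.idxOf c) = c :: l.drop (l.idxOf c + 1) := by
      rw [List.drop_eq_getElem_cons hk, hget]
    have h2 : 2 ≤ (l.drop (l.idxOf c + 1)).count c := by
      rw [hdrop, List.count_cons_self] at hsplit; omega
    have hne : l.drop (l.idxOf c + 1) ≠ [] := by
      intro hnil; rw [hnil] at h2; simp at h2
    have hlt : l.idxOf c + 1 < l.length := by
      by_contra hge
      exact hne (List.drop_eq_nil_of_le (by omega))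
    refine ⟨(l.idxOf c : Int), ?_, ?_⟩
    · rw [PySem.List.mem_pyRange_one]
      exact ⟨Int.natCast_nonneg _, by omega⟩
    · rw [inner_eq l _ (Int.natCast_nonneg _) (by exact_mod_cast Nat.lt_of_succ_lt hlt)]
      simp only [Int.toNat_natCast]
      rw [hget]
      exact_mod_cast h2

theorem a_iff (st : String) :
    stcheck st = true ↔ ∃ c ∈ st.toList, 3 ≤ st.toList.count c := aList_iff st.toList

theorem alt_iff (st : String) :
    stcheck_alt st = true ↔ ∃ c ∈ st.toList, 3 ≤ st.toList.count c := by
  show stcheckAltGo PySem.Dict.empty st.toList = true ↔ _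
  rw [altGo_iff]
  have hz : ∀ c : Char, (PySem.Dict.empty : PySem.Dict Char Int).getD c 0 = 0 := fun _ => rfl
  constructor <;> rintro ⟨c, hm, h⟩ <;> refine ⟨c, hm, ?_⟩
  · rw [hz c, zero_add] at h; exact_mod_cast h
  · rw [hz c, zero_add]; exact_mod_cast h

-- ===== VERDICT (by name: the statement is the Claim_ definition above) =====
theorem stcheck_spec : Claim_equal_stcheck := by
  intro st _
  unfold Spec_stcheck
  by_cases h : ∃ c ∈ st.toList, 3 ≤ st.toList.count c
  · rw [(a_iff st).mpr h, ((alt_iff st).mpr h).symm]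
  · have ha := (a_iff st).not.mpr h
    have hb := (alt_iff st).not.mpr h
    simp only [Bool.not_eq_true] at ha hb
    rw [ha, hb]
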